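-- pv_equiv track=rewrite | github.com/nepenth/Agentic-HomeLab | Agentic-Backend/app/services/email_thread_detection.py | _contains_task_keywords
-- ===== SOURCE A (Python) =====
-- from typing import List, Dict, Any, Optional, Set, Tuple, Union
--
-- def _contains_task_keywords(emails: List[Dict[str, Any]]) -> bool:
--     """Check if emails contain task-related keywords."""
--     task_keywords = [
--         "task", "todo", "action", "complete", "deadline", "due",
--         "assign", "responsible", "follow-up", "next steps"
--     ]
--
--     for email in emails:
--         content = f"{email.get('subject', '')} {email.get('content', '')}".lower()
--         if any(keyword in content for keyword in task_keywords):
--             return True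
--     return False
-- ===== SOURCE B (Python) =====
-- from typing import List, Dict, Any
--
-- def _contains_task_keywords(emails: List[Dict[str, Any]]) -> bool:
--     """Check if emails contain task-related keywords."""
--     task_keywords = [
--         "task", "todo", "action", "complete", "deadline", "due",
--         "assign", "responsible", "follow-up", "next steps"
--     ]
--
--     def scan(text: str) -> bool:
--         # single left-to-right pass: at each position, test whether some
--         # keyword starts there (naive multi-pattern matcher)
--         for i in range(len(text)):
--             for k in task_keywords:
--                 if text.startswith(k, i):
--                     return True
--         return False
--
--     for email in emails:
--         if scan(f"{email.get('subject', '')} {email.get('content', '')}".lower()):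
--             return True
--     return False
-- ===== Notes on version B (the rewrite author's own statement) =====
-- stated objective: alternative
-- what changed: B replaces A's per-keyword substring searches ('keyword in content') by one explicit left-to-right position scan of each lowered email text, testing at every position whether some keyword starts there (a naive multi-pattern matcher).
import Mathlib
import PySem

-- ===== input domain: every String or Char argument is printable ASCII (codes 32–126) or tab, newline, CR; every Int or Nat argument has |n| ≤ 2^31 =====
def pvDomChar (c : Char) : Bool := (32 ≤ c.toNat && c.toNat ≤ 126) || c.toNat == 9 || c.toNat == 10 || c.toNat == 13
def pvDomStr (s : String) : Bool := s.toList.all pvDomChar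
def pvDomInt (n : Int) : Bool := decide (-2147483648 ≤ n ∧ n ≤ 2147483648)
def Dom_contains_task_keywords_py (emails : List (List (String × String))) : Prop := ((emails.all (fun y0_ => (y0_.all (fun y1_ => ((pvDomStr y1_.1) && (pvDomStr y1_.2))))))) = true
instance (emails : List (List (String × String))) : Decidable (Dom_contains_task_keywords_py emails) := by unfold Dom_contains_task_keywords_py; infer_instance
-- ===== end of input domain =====

-- B replaces A's per-keyword substring searches by one explicit left-to-right position scan of
-- each lowered text, testing at each position whether some keyword starts there (alternative
-- decomposition, same cost; return value only, no mutation).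

-- ===== PORT A =====
-- email.get(key, '') on the association-list dict: first matching key, else the default
def pvGetD (d : List (String × String)) (k dflt : String) : String :=
  match d.find? (fun p => p.1 == k) with
  | some p => p.2
  | none => dflt

def pvKeywordsA : List (List Char) :=
  ["task".toList, "todo".toList, "action".toList, "complete".toList, "deadline".toList,
   "due".toList, "assign".toList, "responsible".toList, "follow-up".toList, "next steps".toList]

-- f"{email.get('subject','')} {email.get('content','')}".lower(), on code points
def contains_task_keywords_py (emails : List (List (String × String))) : Bool :=
  emails.any (fun email =>
    let content := PySem.Chars.lower
      ((pvGetD email "subject" "").toList ++ ' ' :: (pvGetD email "content" "").toList)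
    pvKeywordsA.any (fun keyword => PySem.Chars.isIn keyword content))

-- ===== PORT B =====
-- email.get(key, '') written as a direct recursion over the association list
def pvLookup (k : String) : List (String × String) → String
  | [] => ""
  | (k', v) :: rest => if k' == k then v else pvLookup k rest

def pvKeywordsB : List (List Char) :=
  ["task".toList, "todo".toList, "action".toList, "complete".toList, "deadline".toList,
   "due".toList, "assign".toList, "responsible".toList, "follow-up".toList, "next steps".toList]

-- 'for i in range(len(text)): if text.startswith(k, i)' — recursion over the suffixes of text
def pvScan (kws : List (List Char)) : List Char → Bool
  | [] => false
  | c :: rest =>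
      if kws.any (fun k => PySem.Chars.startswith (c :: rest) k) then true
      else pvScan kws rest

def contains_task_keywords_py_alt : List (List (String × String)) → Bool
  | [] => false
  | email :: rest =>
      if pvScan pvKeywordsB (PySem.Chars.lower
          ((pvLookup "subject" email).toList ++ ' ' :: (pvLookup "content" email).toList))
      then true else contains_task_keywords_py_alt rest

-- ===== PRECONDITION & SPEC =====
def Spec_contains_task_keywords_py (emails : List (List (String × String))) (out : Bool) : Prop := out = contains_task_keywords_py_alt emails
instance (emails : List (List (String × String))) (out : Bool) : Decidable (Spec_contains_task_keywords_py emails out) := by unfold Spec_contains_task_keywords_py; infer_instance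

-- ===== CLAIM (what is proved, stated in full; the proofs are below) =====
def Claim_equal_contains_task_keywords_py : Prop := ∀ (emails : List (List (String × String))), Dom_contains_task_keywords_py emails → Spec_contains_task_keywords_py emails (contains_task_keywords_py emails)

-- ===== LEMMAS AND PROOFS =====

lemma pvLookup_eq_getD (k : String) (d : List (String × String)) :
    pvLookup k d = pvGetD d k "" := by
  induction d with
  | nil => rfl
  | cons p rest ih =>
    cases p with
    | mk k' v =>
      have hb : (k' == k) = (decide (k' = k)) := rfl
      by_cases h : k' = k
      · simp [pvLookup, pvGetD, List.find?, h]
      · simp [pvLookup, pvGetD, List.find?, hb, h] at ih ⊢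
        exact ih

-- pvScan finds a keyword iff some keyword is an infix, for nonempty keywords
lemma pvScan_iff_infix (kws : List (List Char)) (hne : ∀ k ∈ kws, k ≠ []) (l : List Char) :
    pvScan kws l = true ↔ ∃ k ∈ kws, k <:+: l := by
  induction l with
  | nil =>
    simp only [pvScan]
    constructor
    · intro h; cases h
    · rintro ⟨k, hk, hinf⟩
      exact absurd (List.infix_nil.mp hinf) (hne k hk)
  | cons c rest ih =>
    simp only [pvScan]
    split_ifs with h
    · simp only [true_iff]
      rcases List.any_eq_true.mp h with ⟨k, hk, hsw⟩
      exact ⟨k, hk, ((PySem.Chars.startswith_iff _ _).mp hsw).isInfix⟩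
    · rw [ih]
      constructor
      · rintro ⟨k, hk, hinf⟩
        exact ⟨k, hk, hinf.trans (List.suffix_cons c rest).isInfix⟩
      · rintro ⟨k, hk, hinf⟩
        rcases List.infix_cons_iff.mp hinf with hp | hi
        · exact absurd (List.any_eq_true.mpr ⟨k, hk, (PySem.Chars.startswith_iff _ _).mpr hp⟩) h
        · exact ⟨k, hk, hi⟩

lemma keywordsB_ne : ∀ k ∈ pvKeywordsB, k ≠ [] := by decide

-- ===== VERDICT (by name: the statement is the Claim_ definition above) =====
-- one email: A's inner keyword loop agrees with B's position scan
lemma any_isIn_eq_pvScan (content : List Char) :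
    (pvKeywordsA.any (fun keyword => PySem.Chars.isIn keyword content))
      = pvScan pvKeywordsB content := by
  rw [Bool.eq_iff_iff, List.any_eq_true, pvScan_iff_infix pvKeywordsB keywordsB_ne]
  constructor
  · rintro ⟨k, hk, hIn⟩
    exact ⟨k, by revert hk; simp [pvKeywordsA, pvKeywordsB],
      (PySem.Chars.isIn_iff_infix k content).mp hIn⟩
  · rintro ⟨k, hk, hinf⟩
    exact ⟨k, by revert hk; simp [pvKeywordsA, pvKeywordsB],
      (PySem.Chars.isIn_iff_infix k content).mpr hinf⟩

theorem contains_task_keywords_py_spec : Claim_equal_contains_task_keywords_py := by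
  intro emails h
  clear h
  unfold Spec_contains_task_keywords_py
  induction emails with
  | nil => simp [contains_task_keywords_py, contains_task_keywords_py_alt]
  | cons email rest ih =>
    simp only [contains_task_keywords_py, contains_task_keywords_py_alt, List.any_cons] at *
    rw [← ih, pvLookup_eq_getD, pvLookup_eq_getD, ← any_isIn_eq_pvScan]
    cases pvKeywordsA.any (fun keyword => PySem.Chars.isIn keyword
      (PySem.Chars.lower ((pvGetD email "subject" "").toList
        ++ ' ' :: (pvGetD email "content" "").toList))) <;> simp
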